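-- pv_equiv track=rewrite | github.com/collinsakenga/codewars_solutions | 5 kyu/5 kyu_k-Primes.py | puzzle
-- ===== SOURCE A (Python) =====
-- def count_Kprimes(k, start, nd):
--     numbers=[]
--     for i in range(start, nd+1):
--         if len(factorization(i))==k:
--             numbers.append(i)
--     return numbers
--
-- def factorization(n):
--     res=[]
--     factor=2
--     while factor*factor<=n:
--         if n%factor==0:
--             res.append(factor)
--             n//=factor
--             factor=2
--         else:
--             factor+=1
--     res.append(n)
--     return res
--
-- def puzzle(s):
--     first, second, third=count_Kprimes(1, 2, s), count_Kprimes(3, 2, s), count_Kprimes(7, 2, s)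
--     target={(s-i):"" for i in third}
--     total=0
--     for i in second:
--         for j in first:
--             if (i+j) in target:
--                 total+=1
--     return total
-- ===== SOURCE B (Python) =====
-- def puzzle(s):
--     ones = []
--     threes = []
--     sevens = []
--     for n in range(2, s + 1):
--         m = n
--         d = 2
--         w = 0
--         while d * d <= m:
--             if m % d == 0:
--                 m //= d
--                 w += 1
--             else:
--                 d += 1
--         if m > 1:
--             w += 1
--         if w == 1:
--             ones.append(n)
--         elif w == 3:
--             threes.append(n)
--         elif w == 7:
--             sevens.append(n)
--     ones_set = set(ones)
--     total = 0
--     for i in threes: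
--         for t in sevens:
--             if s - i - t in ones_set:
--                 total += 1
--     return total
-- ===== Notes on version B (the rewrite author's own statement) =====
-- stated objective: faster
-- what changed: One pass over 2..s with a count-only full-division trial factorization buckets numbers into 1-/3-/7-prime lists directly (instead of three count_Kprimes passes each rebuilding a factor list with factor reset to 2), and the triple count iterates the small threes x sevens grid testing primality of the remainder in a set, instead of A's huge threes x primes double loop against a dict of s-t targets.
import Mathlib
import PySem

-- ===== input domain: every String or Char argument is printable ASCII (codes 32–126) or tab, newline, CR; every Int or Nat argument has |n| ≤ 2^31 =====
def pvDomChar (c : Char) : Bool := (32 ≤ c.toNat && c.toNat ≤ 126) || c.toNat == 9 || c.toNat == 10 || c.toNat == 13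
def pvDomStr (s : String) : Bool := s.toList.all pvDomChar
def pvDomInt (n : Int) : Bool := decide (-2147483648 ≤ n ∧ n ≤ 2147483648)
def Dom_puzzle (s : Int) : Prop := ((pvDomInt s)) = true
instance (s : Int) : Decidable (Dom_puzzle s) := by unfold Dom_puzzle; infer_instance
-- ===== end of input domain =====

-- B replaces A's three full-range count_Kprimes passes (each rebuilding a factor LIST with the
-- scan reset to 2 after every hit) by one bucketing pass with a count-only factorization, and
-- replaces A's huge threes×primes loop against a dict of (s-t) targets by a threes×sevens loop
-- testing the remainder against the set of primes; measured faster (constant factor).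

-- ===== PORT A =====
-- tiny termination facts for the trial-division while-loops (term proofs: kept small on purpose)
theorem pvlem_two_le_succ {d : Int} (hd : 2 ≤ d) : 2 ≤ d + 1 :=
  le_trans hd (le_add_of_nonneg_right zero_le_one)

theorem pvlem_four_le {f n : Int} (hf : 2 ≤ f) (h : f * f ≤ n) : 4 ≤ n :=
  le_trans (le_trans (by decide : (4:Int) ≤ 2 * 2)
    (mul_le_mul hf hf (by decide) (le_trans (by decide) hf))) h

theorem pvlem_floordiv_lt {n f : Int} (hf : 2 ≤ f) (h : f * f ≤ n) :
    PySem.Int.floordiv n f < n :=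
  (PySem.Int.floordiv_lt_iff_lt_mul (lt_of_lt_of_le (by decide : (0:Int) < 2) hf)).mpr
    (lt_mul_right (lt_of_lt_of_le (by decide : (0:Int) < 4) (pvlem_four_le hf h))
      (lt_of_lt_of_le (by decide : (1:Int) < 2) hf))

theorem pvlem_dec_fst {n f : Int} (hf : 2 ≤ f) (h : f * f ≤ n) :
    (PySem.Int.floordiv n f).toNat < n.toNat :=
  (Int.toNat_lt_toNat (lt_of_lt_of_le (by decide : (0:Int) < 4) (pvlem_four_le hf h))).mpr
    (pvlem_floordiv_lt hf h)

theorem pvlem_dec_snd {n f : Int} (hf : 2 ≤ f) (h : f * f ≤ n) :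
    n.toNat + 2 - (f + 1).toNat < n.toNat + 2 - f.toNat :=
  Int.toNat_add (le_trans (by decide : (0:Int) ≤ 2) hf) (by decide : (0:Int) ≤ 1) ▸
    Nat.sub_succ_lt_self (n.toNat + 2) f.toNat
      (Nat.lt_of_le_of_lt
        (Int.toNat_le_toNat
          (le_trans (le_mul_of_one_le_left (le_trans (by decide : (0:Int) ≤ 2) hf)
            (le_trans (by decide : (1:Int) ≤ 2) hf)) h))
        (Nat.lt_add_of_pos_right (by decide)))

-- while factor*factor<=n: … — the loop is only ever entered with factor ≥ 2, carried as a hypothesis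
def factLoopA (res : List Int) (n factor : Int) (hf : 2 ≤ factor) : List Int :=
  if h : factor * factor ≤ n then
    if PySem.Int.mod n factor = 0 then
      factLoopA (res ++ [factor]) (PySem.Int.floordiv n factor) 2 (le_refl 2)
    else
      factLoopA res n (factor + 1) (pvlem_two_le_succ hf)
  else res ++ [n]
termination_by (n.toNat, n.toNat + 2 - factor.toNat)
decreasing_by
  · exact Prod.Lex.left _ _ (pvlem_dec_fst hf h)
  · exact Prod.Lex.right _ (pvlem_dec_snd hf h)

def factorizationA (n : Int) : List Int := factLoopA [] n 2 (le_refl 2)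

def count_KprimesA (k start nd : Int) : List Int :=
  (PySem.List.pyRange start (nd + 1) 1).foldl
    (fun numbers i =>
      if PySem.List.len (factorizationA i) = k then numbers ++ [i] else numbers) []

def puzzle (s : Int) : Int :=
  let first := count_KprimesA 1 2 s
  let second := count_KprimesA 3 2 s
  let third := count_KprimesA 7 2 s
  let target : PySem.Dict Int String :=
    third.foldl (fun d i => d.insert (s - i) "") PySem.Dict.empty
  second.foldl (fun total i =>
    first.foldl (fun total j =>
      if target.contains (i + j) then total + 1 else total) total) 0

-- ===== PORT B =====
-- 'while d*d <= m: if m % d == 0: m //= d; w += 1 else: d += 1' — entered only with d ≥ 2 (carried as a hypothesis)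
def omegaLoopB (m d w : Int) (hd : 2 ≤ d) : Int :=
  if h : d * d ≤ m then
    if PySem.Int.mod m d = 0 then
      omegaLoopB (PySem.Int.floordiv m d) d (w + 1) hd
    else
      omegaLoopB m (d + 1) w (pvlem_two_le_succ hd)
  else if 1 < m then w + 1 else w
termination_by (m.toNat, m.toNat + 2 - d.toNat)
decreasing_by
  · exact Prod.Lex.left _ _ (pvlem_dec_fst hd h)
  · exact Prod.Lex.right _ (pvlem_dec_snd hd h)

def omegaB (n : Int) : Int := omegaLoopB n 2 0 (le_refl 2)

def puzzle_alt (s : Int) : Int :=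
  let b :=
    (PySem.List.pyRange 2 (s + 1) 1).foldl
      (fun (acc : List Int × List Int × List Int) n =>
        let w := omegaB n
        if w = 1 then (acc.1 ++ [n], acc.2.1, acc.2.2)
        else if w = 3 then (acc.1, acc.2.1 ++ [n], acc.2.2)
        else if w = 7 then (acc.1, acc.2.1, acc.2.2 ++ [n])
        else acc) ([], [], [])
  let onesSet : PySem.Set Int := PySem.Set.ofList b.1
  b.2.1.foldl (fun total i =>
    b.2.2.foldl (fun total t =>
      if PySem.Set.contains onesSet (s - i - t) then total + 1 else total) total) 0

-- ===== PRECONDITION & SPEC =====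
def Spec_puzzle (s : Int) (out : Int) : Prop := out = puzzle_alt s
instance (s : Int) (out : Int) : Decidable (Spec_puzzle s out) := by unfold Spec_puzzle; infer_instance

-- ===== CLAIM (what is proved, stated in full; the proofs are below) =====
def Claim_equal_puzzle : Prop := ∀ (s : Int), Dom_puzzle s → Spec_puzzle s (puzzle s)

-- ===== LEMMAS AND PROOFS =====

-- number of prime factors with multiplicity, the common mathematical value both programs compute
def pvOm (n : Int) : Int := (n.toNat.primeFactorsList.length : Int)

-- A's trial-division loop produces the sorted prime factor list
theorem factLoopA_eq (res : List Int) (n factor : Int) (hf : 2 ≤ factor)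
    (h2 : 2 ≤ n) (hmin : factor ≤ (n.toNat.minFac : Int)) :
    factLoopA res n factor hf = res ++ (n.toNat.primeFactorsList).map (fun p => (p : Int)) := by
  induction res, n, factor, hf using factLoopA.induct with
  | case1 res n factor hf h hmod ih =>
    have hdvd : factor ∣ n := (PySem.Int.mod_eq_zero_iff_dvd n factor).mp hmod
    have hn4 : (4:Int) ≤ n := pvlem_four_le hf h
    have hnN : n = ((n.toNat : Nat) : Int) := by omega
    have hfd : factor.toNat ∣ n.toNat := by
      have hcast : ((factor.toNat : Nat) : Int) ∣ ((n.toNat : Nat) : Int) := by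
        rw [Int.toNat_of_nonneg (by omega : (0:Int) ≤ factor), ← hnN]; exact hdvd
      exact_mod_cast hcast
    have hminle : n.toNat.minFac ≤ factor.toNat := Nat.minFac_le_of_dvd (by omega) hfd
    have hfeq : factor = ((n.toNat.minFac : Nat) : Int) := by omega
    have hdivcast : PySem.Int.floordiv n factor = ((n.toNat / n.toNat.minFac : Nat) : Int) := by
      rw [PySem.Int.floordiv_eq_ediv_of_pos (by omega)]
      conv_lhs => rw [hnN, hfeq]
      exact (Int.natCast_div _ _).symm
    have hpp : n.toNat.minFac * n.toNat.minFac ≤ n.toNat := by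
      have h' := h; rw [hfeq] at h'; rw [hnN] at h'; exact_mod_cast h'
    have hq2 : 2 ≤ n.toNat / n.toNat.minFac := by
      have hple : n.toNat.minFac ≤ n.toNat / n.toNat.minFac :=
        (Nat.le_div_iff_mul_le (by omega)).mpr hpp
      omega
    have h2' : 2 ≤ PySem.Int.floordiv n factor := by rw [hdivcast]; exact_mod_cast hq2
    have hmin' : (2:Int) ≤ (((PySem.Int.floordiv n factor).toNat.minFac : Nat) : Int) := by
      rw [hdivcast, Int.toNat_natCast]
      exact_mod_cast (Nat.minFac_prime (by omega : n.toNat / n.toNat.minFac ≠ 1)).two_le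
    rw [factLoopA, dif_pos h, if_pos hmod, ih h2' hmin']
    obtain ⟨k, hk⟩ : ∃ k, n.toNat = k + 2 := ⟨n.toNat - 2, by omega⟩
    rw [hdivcast, Int.toNat_natCast]
    conv_rhs => rw [hk, Nat.primeFactorsList_add_two]
    rw [← hk]
    simp [hfeq]
  | case2 res n factor hf h hmod ih =>
    have hndvd : ¬ factor ∣ n := fun hdvd => hmod ((PySem.Int.mod_eq_zero_iff_dvd n factor).mpr hdvd)
    have hnN : n = ((n.toNat : Nat) : Int) := by omega
    have hne : factor ≠ ((n.toNat.minFac : Nat) : Int) := by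
      intro hfe
      apply hndvd
      rw [hfe, hnN]
      exact_mod_cast n.toNat.minFac_dvd
    have hmin' : factor + 1 ≤ ((n.toNat.minFac : Nat) : Int) := by omega
    rw [factLoopA, dif_pos h, if_neg hmod]
    exact ih h2 hmin'
  | case3 res n factor hf h =>
    have hnN : n = ((n.toNat : Nat) : Int) := by omega
    have hprime : Nat.Prime n.toNat := by
      by_contra hnp
      have hsq := Nat.minFac_sq_le_self (by omega : 0 < n.toNat) hnp
      apply h
      calc factor * factor ≤ ((n.toNat.minFac : Nat) : Int) * ((n.toNat.minFac : Nat) : Int) :=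
            mul_le_mul hmin hmin (by omega) (by positivity)
        _ ≤ n := by rw [hnN]; rw [pow_two] at hsq; exact_mod_cast hsq
    rw [factLoopA, dif_neg h, Nat.primeFactorsList_prime hprime]
    simp [← hnN]

theorem factorizationA_eq (n : Int) (h2 : 2 ≤ n) :
    factorizationA n = (n.toNat.primeFactorsList).map (fun p => (p : Int)) := by
  apply factLoopA_eq _ _ _ _ h2
  have : n.toNat ≠ 1 := by omega
  exact_mod_cast (Nat.minFac_prime this).two_le

-- B's trial-division loop adds the number of prime factors (with multiplicity)
theorem omegaLoopB_spec (m d w : Int) (hd : 2 ≤ d) (hm : 1 ≤ m)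
    (hmin : m = 1 ∨ d ≤ (m.toNat.minFac : Int)) :
    omegaLoopB m d w hd = w + pvOm m := by
  induction m, d, w, hd using omegaLoopB.induct with
  | case1 m d w hd h hmod ih =>
    have hdvd : d ∣ m := (PySem.Int.mod_eq_zero_iff_dvd m d).mp hmod
    have hm4 : (4:Int) ≤ m := pvlem_four_le hd h
    have hdle : d ≤ ((m.toNat.minFac : Nat) : Int) := hmin.resolve_left (by omega)
    have hmN : m = ((m.toNat : Nat) : Int) := by omega
    have hfd : d.toNat ∣ m.toNat := by
      have hcast : ((d.toNat : Nat) : Int) ∣ ((m.toNat : Nat) : Int) := by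
        rw [Int.toNat_of_nonneg (by omega : (0:Int) ≤ d), ← hmN]; exact hdvd
      exact_mod_cast hcast
    have hminle : m.toNat.minFac ≤ d.toNat := Nat.minFac_le_of_dvd (by omega) hfd
    have hdeq : d = ((m.toNat.minFac : Nat) : Int) := by omega
    have hdivcast : PySem.Int.floordiv m d = ((m.toNat / m.toNat.minFac : Nat) : Int) := by
      rw [PySem.Int.floordiv_eq_ediv_of_pos (by omega)]
      conv_lhs => rw [hmN, hdeq]
      exact (Int.natCast_div _ _).symm
    have hpp : m.toNat.minFac * m.toNat.minFac ≤ m.toNat := by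
      have h' := h; rw [hdeq] at h'; rw [hmN] at h'; exact_mod_cast h'
    have hq1 : 1 ≤ m.toNat / m.toNat.minFac := by
      have hple : m.toNat.minFac ≤ m.toNat / m.toNat.minFac :=
        (Nat.le_div_iff_mul_le (by omega)).mpr hpp
      omega
    have hm' : 1 ≤ PySem.Int.floordiv m d := by rw [hdivcast]; exact_mod_cast hq1
    have hmin' : PySem.Int.floordiv m d = 1 ∨
        d ≤ (((PySem.Int.floordiv m d).toNat.minFac : Nat) : Int) := by
      by_cases hq : m.toNat / m.toNat.minFac = 1
      · left; rw [hdivcast, hq]; rfl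
      · right
        rw [hdivcast, Int.toNat_natCast]
        have he2 : 2 ≤ (m.toNat / m.toNat.minFac).minFac :=
          (Nat.minFac_prime hq).two_le
        have hedvd : (m.toNat / m.toNat.minFac).minFac ∣ m.toNat :=
          dvd_trans (Nat.minFac_dvd _) (Nat.div_dvd_of_dvd (Nat.minFac_dvd _))
        have := Nat.minFac_le_of_dvd he2 hedvd
        omega
    rw [omegaLoopB, dif_pos h, if_pos hmod, ih hm' hmin']
    have homg : pvOm m = pvOm (PySem.Int.floordiv m d) + 1 := by
      unfold pvOm
      obtain ⟨k, hk⟩ : ∃ k, m.toNat = k + 2 := ⟨m.toNat - 2, by omega⟩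
      rw [hdivcast, Int.toNat_natCast]
      conv_lhs => rw [hk, Nat.primeFactorsList_add_two]
      rw [← hk]
      simp
    rw [homg]; ring
  | case2 m d w hd h hmod ih =>
    have hm4 : (4:Int) ≤ m := pvlem_four_le hd h
    have hdle : d ≤ ((m.toNat.minFac : Nat) : Int) := hmin.resolve_left (by omega)
    have hmN : m = ((m.toNat : Nat) : Int) := by omega
    have hne : d ≠ ((m.toNat.minFac : Nat) : Int) := by
      intro hde
      apply hmod
      apply (PySem.Int.mod_eq_zero_iff_dvd m d).mpr
      rw [hde, hmN]
      exact_mod_cast m.toNat.minFac_dvd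
    exact (by rw [omegaLoopB, dif_pos h, if_neg hmod]; exact ih hm (Or.inr (by omega)))
  | case3 m d w hd h hlt =>
    have hdle : d ≤ ((m.toNat.minFac : Nat) : Int) := hmin.resolve_left (by omega)
    have hmN : m = ((m.toNat : Nat) : Int) := by omega
    have hprime : Nat.Prime m.toNat := by
      by_contra hnp
      have hsq := Nat.minFac_sq_le_self (by omega : 0 < m.toNat) hnp
      apply h
      calc d * d ≤ ((m.toNat.minFac : Nat) : Int) * ((m.toNat.minFac : Nat) : Int) :=
            mul_le_mul hdle hdle (by omega) (by positivity)
        _ ≤ m := by rw [hmN]; rw [pow_two] at hsq; exact_mod_cast hsq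
    rw [omegaLoopB, dif_neg h, if_pos hlt]
    unfold pvOm
    rw [Nat.primeFactorsList_prime hprime]
    simp
  | case4 m d w hd h hle =>
    have hm1 : m = 1 := by omega
    rw [omegaLoopB, dif_neg h, if_neg hle]
    unfold pvOm
    rw [hm1]
    simp

theorem omegaB_eq (n : Int) (h2 : 2 ≤ n) : omegaB n = pvOm n := by
  have h1 : n.toNat ≠ 1 := by omega
  have := omegaLoopB_spec n 2 0 (le_refl 2) (by omega)
    (Or.inr (by exact_mod_cast (Nat.minFac_prime h1).two_le))
  simpa [omegaB] using this

-- A's k-prime list is a filter of the range by pvOm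
theorem countK_eq (k s : Int) :
    count_KprimesA k 2 s
      = (PySem.List.pyRange 2 (s + 1) 1).filter (fun i => decide (pvOm i = k)) := by
  unfold count_KprimesA
  rw [PySem.List.foldl_append_ite_eq_filter]
  rw [List.nil_append]
  apply List.filter_congr
  intro i hi
  have h2 : 2 ≤ i := ((PySem.List.mem_pyRange_one).mp hi).1
  have := factorizationA_eq i h2
  simp [this, pvOm]

-- B's bucketing pass is three filters of the range
theorem bucket_eq (l : List Int) (acc : List Int × List Int × List Int) :
    l.foldl
      (fun (acc : List Int × List Int × List Int) n =>
        let w := omegaB n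
        if w = 1 then (acc.1 ++ [n], acc.2.1, acc.2.2)
        else if w = 3 then (acc.1, acc.2.1 ++ [n], acc.2.2)
        else if w = 7 then (acc.1, acc.2.1, acc.2.2 ++ [n])
        else acc) acc
    = (acc.1 ++ l.filter (fun n => decide (omegaB n = 1)),
       acc.2.1 ++ l.filter (fun n => decide (omegaB n = 3)),
       acc.2.2 ++ l.filter (fun n => decide (omegaB n = 7))) := by
  induction l generalizing acc with
  | nil => simp
  | cons x t ih =>
    rw [List.foldl_cons, ih]
    by_cases h1 : omegaB x = 1
    · simp [h1]
    · by_cases h3 : omegaB x = 3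
      · simp [h3]
      · by_cases h7 : omegaB x = 7
        · simp [h7]
        · simp [h1, h3, h7]

-- the two inner loops count the same pairs (bijection j ↔ c - j)
theorem countP_sub_comm (P V : List Int) (c : Int) (hP : P.Nodup) (hV : V.Nodup) :
    P.countP (fun j => decide (c - j ∈ V)) = V.countP (fun t => decide (c - t ∈ P)) := by
  rw [List.countP_eq_length_filter, List.countP_eq_length_filter]
  have hinj : Function.Injective (fun j : Int => c - j) := by
    intro a b hab; dsimp only at hab; omega
  have hperm :
      List.Perm ((P.filter (fun j => decide (c - j ∈ V))).map (fun j => c - j))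
        (V.filter (fun t => decide (c - t ∈ P))) := by
    rw [List.perm_ext_iff_of_nodup ((hP.filter _).map hinj) (hV.filter _)]
    intro x
    simp only [List.mem_map, List.mem_filter, decide_eq_true_eq]
    constructor
    · rintro ⟨j, ⟨hjP, hjV⟩, rfl⟩
      exact ⟨hjV, by simpa using hjP⟩
    · rintro ⟨hxV, hxP⟩
      exact ⟨c - x, ⟨hxP, by simpa using hxV⟩, by omega⟩
  calc (P.filter (fun j => decide (c - j ∈ V))).length
      = ((P.filter (fun j => decide (c - j ∈ V))).map (fun j => c - j)).length := by
        rw [List.length_map]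
    _ = (V.filter (fun t => decide (c - t ∈ P))).length := hperm.length_eq

-- membership in A's target dict is membership of s - x in the third list
theorem target_contains_eq (s x : Int) (third : List Int) :
    ((third.foldl (fun d i => d.insert (s - i) "") (PySem.Dict.empty : PySem.Dict Int String)).contains x)
      = decide (s - x ∈ third) := by
  rw [PySem.Dict.contains_eq_decide_mem_keys]
  have hkeys := PySem.Dict.keys_foldl_insert_key third (fun i => s - i)
    (fun _ _ => "") (PySem.Dict.empty : PySem.Dict Int String)
  rw [hkeys]
  rw [decide_eq_decide]
  rw [show (PySem.Dict.empty : PySem.Dict Int String).keys = ([] : List Int) from rfl]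
  rw [PySem.Set.update_nil_left]
  rw [PySem.Set.mem_ofList]
  constructor
  · rintro h
    obtain ⟨t, ht, rfl⟩ := List.mem_map.mp h
    simpa using ht
  · intro h
    exact List.mem_map.mpr ⟨s - x, h, by omega⟩

theorem set_contains_eq (ones : List Int) (x : Int) :
    PySem.Set.contains (PySem.Set.ofList ones) x = decide (x ∈ ones) := by
  rw [PySem.Set.contains_eq_listContains, List.contains_eq_mem, decide_eq_decide]
  exact PySem.Set.mem_ofList ones x

-- ===== VERDICT (by name: the statement is the Claim_ definition above) =====
theorem puzzle_spec : Claim_equal_puzzle := by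
  intro s _
  unfold Spec_puzzle
  simp only [puzzle, puzzle_alt]
  rw [countK_eq, countK_eq, countK_eq, bucket_eq]
  have hmem : ∀ x ∈ PySem.List.pyRange 2 (s + 1) 1, (2:Int) ≤ x :=
    fun x hx => ((PySem.List.mem_pyRange_one).mp hx).1
  have hfix : ∀ k : Int,
      (PySem.List.pyRange 2 (s + 1) 1).filter (fun n => decide (omegaB n = k))
        = (PySem.List.pyRange 2 (s + 1) 1).filter (fun i => decide (pvOm i = k)) := by
    intro k
    apply List.filter_congr
    intro x hx
    rw [omegaB_eq x (hmem x hx)]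
  rw [hfix 1, hfix 3, hfix 7]
  simp only [List.nil_append]
  have hnd : (PySem.List.pyRange 2 (s + 1) 1).Nodup := PySem.List.nodup_pyRange_one 2 (s + 1)
  simp only [target_contains_eq, set_contains_eq, decide_eq_true_eq]
  apply PySem.List.foldl_congr_mem
  intro acc i _
  rw [PySem.List.foldl_ite_add_one, PySem.List.foldl_ite_add_one]
  congr 1
  norm_cast
  simp only [show ∀ j : Int, s - (i + j) = s - i - j from fun j => by ring]
  exact countP_sub_comm _ _ (s - i) (hnd.filter _) (hnd.filter _)
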